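-- pv_equiv track=rewrite | github.com/cburik/puzzles | solutions/distinct_differences.py | get_distinct_difference
-- ===== SOURCE A (Python) =====
-- from typing import List, Tuple
--
-- def get_number_of_distinct_elements(input_list: list) -> int:
--     """Returns the number of distinct elements in a list"""
--     return len(set(input_list))
--
-- def split_list_on_index(input_list: list, index: int) -> Tuple[list, list]:
--     """Splits a list on a index and returns two lists"""
--     left_list = input_list[:index]
--     right_list = input_list[index + 1 :]
--     return (left_list, right_list)
--
-- def get_distinct_difference(input_list: List[int]) -> List[int]:
--     """Main"""
--     distinct_difference = []
--     for i in range(0, len(input_list)):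
--         left_list, right_list = split_list_on_index(input_list, i)
--         n_distinct_left = get_number_of_distinct_elements(left_list)
--         n_distinct_right = get_number_of_distinct_elements(right_list)
--         difference = n_distinct_left - n_distinct_right
--         distinct_difference.append(difference)
--
--     return distinct_difference
-- ===== SOURCE B (Python) =====
-- def get_distinct_difference(input_list):
--     """Two linear passes: suffix distinct counts from the right, then prefix counts from the left."""
--     seen = set()
--     suffix_counts = []          # after the loop, reversed(suffix_counts)[i] == #distinct of input_list[i+1:]
--     for x in reversed(input_list):
--         suffix_counts.append(len(seen))
--         seen.add(x)
--     seen = set()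
--     result = []
--     for x, s in zip(input_list, reversed(suffix_counts)):
--         result.append(len(seen) - s)
--         seen.add(x)
--     return result
-- ===== Notes on version B (the rewrite author's own statement) =====
-- stated objective: faster
-- what changed: Replaces the per-index slice-and-set rebuild (a fresh set of the whole prefix and suffix for every index) with two linear passes that maintain one running seen-set each, recording suffix distinct counts right-to-left and prefix counts left-to-right.
import Mathlib
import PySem

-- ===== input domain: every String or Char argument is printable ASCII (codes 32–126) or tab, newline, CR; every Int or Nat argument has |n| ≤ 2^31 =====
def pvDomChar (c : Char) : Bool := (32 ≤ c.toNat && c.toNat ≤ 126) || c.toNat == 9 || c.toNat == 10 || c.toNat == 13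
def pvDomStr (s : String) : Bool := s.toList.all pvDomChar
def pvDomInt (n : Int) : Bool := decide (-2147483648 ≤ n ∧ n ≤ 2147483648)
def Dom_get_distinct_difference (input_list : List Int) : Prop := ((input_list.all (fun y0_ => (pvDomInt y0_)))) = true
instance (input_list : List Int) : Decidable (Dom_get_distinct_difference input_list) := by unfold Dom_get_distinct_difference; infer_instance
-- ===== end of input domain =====

-- B replaces A's per-index slice-and-set rebuild by two linear passes with running seen-sets (asymptotically faster; exact same values).


-- ===== PORT A =====
def get_number_of_distinct_elements (input_list : List Int) : Int :=
  PySem.Set.len (PySem.Set.ofList input_list)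

def split_list_on_index (input_list : List Int) (index : Int) : List Int × List Int :=
  let left_list := PySem.List.slice input_list none (some index)
  let right_list := PySem.List.slice input_list (some (index + 1)) none
  (left_list, right_list)

def get_distinct_difference (input_list : List Int) : List Int :=
  (PySem.List.pyRange 0 (PySem.List.len input_list) 1).foldl
    (fun distinct_difference i =>
      let p := split_list_on_index input_list i
      let n_distinct_left := get_number_of_distinct_elements p.1
      let n_distinct_right := get_number_of_distinct_elements p.2
      distinct_difference ++ [n_distinct_left - n_distinct_right])
    []

-- ===== PORT B =====
def get_distinct_difference_alt (input_list : List Int) : List Int :=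
  -- pass 1: for x in reversed(input_list): suffix_counts.append(len(seen)); seen.add(x)
  let p1 := input_list.reverse.foldl
    (fun (st : List Int × PySem.Set Int) x =>
      (st.1 ++ [PySem.Set.len st.2], PySem.Set.add st.2 x))
    ([], PySem.Set.empty)
  let suffix_counts := p1.1
  -- pass 2: for x, s in zip(input_list, reversed(suffix_counts)): result.append(len(seen) - s); seen.add(x)
  let p2 := (input_list.zip suffix_counts.reverse).foldl
    (fun (st : List Int × PySem.Set Int) xs =>
      (st.1 ++ [PySem.Set.len st.2 - xs.2], PySem.Set.add st.2 xs.1))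
    ([], PySem.Set.empty)
  p2.1

-- ===== PRECONDITION & SPEC =====
def Spec_get_distinct_difference (input_list : List Int) (out : List Int) : Prop := out = get_distinct_difference_alt input_list
instance (input_list : List Int) (out : List Int) : Decidable (Spec_get_distinct_difference input_list out) := by unfold Spec_get_distinct_difference; infer_instance

-- ===== CLAIM (what is proved, stated in full; the proofs are below) =====
def Claim_equal_get_distinct_difference : Prop := ∀ (input_list : List Int), Dom_get_distinct_difference input_list → Spec_get_distinct_difference input_list (get_distinct_difference input_list)

-- ===== LEMMAS AND PROOFS =====

-- number of distinct elements of a list, as both ports compute it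
def dc (xs : List Int) : Int := PySem.Set.len (PySem.Set.ofList xs)

-- the common target: k-th output is dc(prefix before k) - dc(suffix after k)
def tgt (pre rest : List Int) : List Int :=
  match rest with
  | [] => []
  | x :: r => (dc pre - dc r) :: tgt (pre ++ [x]) r

-- values produced by B's first pass
def tgt1 (zs ys : List Int) : List Int :=
  match ys with
  | [] => []
  | y :: r => dc zs :: tgt1 (zs ++ [y]) r

-- values produced by B's second pass
def tgt2 (zs : List Int) (ps : List (Int × Int)) : List Int :=
  match ps with
  | [] => []
  | p :: r => (dc zs - p.2) :: tgt2 (zs ++ [p.1]) r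

-- suffix distinct counts: Sfun xs lists dc of each proper suffix
def Sfun (xs : List Int) : List Int :=
  match xs with
  | [] => []
  | _ :: r => dc r :: Sfun r

theorem dc_congr (xs ys : List Int) (h : ∀ a, a ∈ xs ↔ a ∈ ys) : dc xs = dc ys := by
  unfold dc PySem.Set.len
  have hp : List.Perm (PySem.Set.ofList xs) (PySem.Set.ofList ys) := by
    rw [List.perm_ext_iff_of_nodup (PySem.Set.nodup_ofList xs) (PySem.Set.nodup_ofList ys)]
    intro a
    simp [PySem.Set.mem_ofList, h a]
  rw [hp.length_eq]

theorem dc_reverse (xs : List Int) : dc xs.reverse = dc xs := by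
  exact dc_congr _ _ (by intro a; simp)

theorem phase1 (ys zs acc : List Int) :
    ys.foldl (fun (st : List Int × PySem.Set Int) x =>
      (st.1 ++ [PySem.Set.len st.2], PySem.Set.add st.2 x)) (acc, PySem.Set.ofList zs)
    = (acc ++ tgt1 zs ys, PySem.Set.ofList (zs ++ ys)) := by
  induction ys generalizing zs acc with
  | nil => simp [tgt1]
  | cons y r ih =>
    simp only [List.foldl_cons]
    rw [show PySem.Set.add (PySem.Set.ofList zs) y = PySem.Set.ofList (zs ++ [y]) from
      (PySem.Set.ofList_append_singleton zs y).symm]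
    rw [ih (zs ++ [y]) (acc ++ [PySem.Set.len (PySem.Set.ofList zs)])]
    simp [tgt1, dc]

theorem tgt1_append_singleton (ys zs : List Int) (y : Int) :
    tgt1 zs (ys ++ [y]) = tgt1 zs ys ++ [dc (zs ++ ys)] := by
  induction ys generalizing zs with
  | nil => simp [tgt1]
  | cons a r ih => simp [tgt1, ih]

theorem suffix_eq (xs : List Int) : (tgt1 [] xs.reverse).reverse = Sfun xs := by
  induction xs with
  | nil => simp [tgt1, Sfun]
  | cons x r ih =>
    simp only [List.reverse_cons, Sfun]
    rw [tgt1_append_singleton]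
    simp [ih, dc_reverse]

theorem phase2 (ps : List (Int × Int)) (zs acc : List Int) :
    ps.foldl (fun (st : List Int × PySem.Set Int) xs =>
      (st.1 ++ [PySem.Set.len st.2 - xs.2], PySem.Set.add st.2 xs.1)) (acc, PySem.Set.ofList zs)
    = (acc ++ tgt2 zs ps, PySem.Set.ofList (zs ++ ps.map Prod.fst)) := by
  induction ps generalizing zs acc with
  | nil => simp [tgt2]
  | cons p r ih =>
    simp only [List.foldl_cons]
    rw [show PySem.Set.add (PySem.Set.ofList zs) p.1 = PySem.Set.ofList (zs ++ [p.1]) from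
      (PySem.Set.ofList_append_singleton zs p.1).symm]
    rw [ih (zs ++ [p.1]) _]
    simp [tgt2, dc]

theorem zip_Sfun (rest zs : List Int) : tgt2 zs (rest.zip (Sfun rest)) = tgt zs rest := by
  induction rest generalizing zs with
  | nil => simp [tgt2, tgt]
  | cons x r ih => simp [Sfun, List.zip_cons_cons, tgt2, tgt, ih]

theorem B_eq (xs : List Int) : get_distinct_difference_alt xs = tgt [] xs := by
  unfold get_distinct_difference_alt
  rw [show (PySem.Set.empty : PySem.Set Int) = PySem.Set.ofList [] from rfl]
  rw [phase1 xs.reverse [] []]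
  simp only [List.nil_append]
  rw [suffix_eq, phase2, zip_Sfun]
  simp

theorem foldl_snoc_map (l : List Int) (g : Int → Int) (acc : List Int) :
    l.foldl (fun a i => a ++ [g i]) acc = acc ++ l.map g := by
  induction l generalizing acc with
  | nil => simp
  | cons x r ih => simp [ih]

theorem range_map_tgt (rest pre xs : List Int) (h : xs = pre ++ rest) :
    (List.range rest.length).map
      (fun j => dc (xs.take (pre.length + j)) - dc (xs.drop (pre.length + j + 1)))
    = tgt pre rest := by
  induction rest generalizing pre with
  | nil => simp [tgt]
  | cons x r ih =>
    rw [List.length_cons, List.range_succ_eq_map, List.map_cons, List.map_map]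
    have h1 : xs.take (pre.length + 0) = pre := by
      subst h; simp
    have h2 : xs.drop (pre.length + 0 + 1) = r := by
      subst h
      rw [show pre.length + 0 + 1 = (pre ++ [x]).length from by simp, show pre ++ x :: r = (pre ++ [x]) ++ r from by simp]
      exact List.drop_left
    have h3 : ((List.range r.length).map
        ((fun j => dc (xs.take (pre.length + j)) - dc (xs.drop (pre.length + j + 1))) ∘ Nat.succ))
        = tgt (pre ++ [x]) r := by
      rw [← ih (pre ++ [x]) (by simp [h])]
      apply List.map_congr_left
      intro j _
      simp only [Function.comp]
      rw [show pre.length + Nat.succ j = (pre ++ [x]).length + j by simp; omega]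
    rw [h3, h1, h2, tgt]

theorem A_eq (xs : List Int) : get_distinct_difference xs = tgt [] xs := by
  unfold get_distinct_difference split_list_on_index get_number_of_distinct_elements
  rw [foldl_snoc_map, PySem.List.pyRange_one]
  simp only [List.nil_append, List.map_map, PySem.List.len_eq, Int.sub_zero, Int.toNat_natCast]
  rw [← range_map_tgt xs [] xs rfl]
  apply List.map_congr_left
  intro k hk
  simp only [Function.comp, List.length_nil]
  rw [show (0:Int) + (k:Int) = ((k:Nat):Int) by simp]
  rw [PySem.List.slice_to_natCast]
  rw [show ((k:Nat):Int) + 1 = (((k+1:Nat)):Int) by push_cast; ring]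
  rw [PySem.List.slice_from_natCast]
  simp [dc]

-- ===== VERDICT (by name: the statement is the Claim_ definition above) =====
theorem get_distinct_difference_spec : Claim_equal_get_distinct_difference := by
  intro xs _
  unfold Spec_get_distinct_difference
  rw [A_eq, B_eq]
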